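-- pv_equiv track=rewrite | github.com/RobinFiveWords/AdventOfCode | 2025/day07.py | timelines
-- ===== SOURCE A (Python) =====
-- def timelines(rows):
--   before = rows[0]
--   for after in rows[1:]:
--     working = [0] * len(after)
--     for i, aval in enumerate(after):
--       bval = before[i]
--       if aval == -1:
--         if i > 0:
--           working[i-1] += bval
--         if i < len(after) - 1:
--           working[i+1] += bval
--       else:
--         working[i] += bval
--     before = working[:]
--   return sum(before)
-- ===== SOURCE B (Python) =====
-- def timelines(rows):
--     # Backward (adjoint) pass: propagate weights from the last row up, then dot with rows[0].
--     w = [1] * len(rows[-1])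
--     for k in range(len(rows) - 1, 0, -1):
--         after = rows[k]
--         n = len(after)
--         w2 = []
--         for i in range(n):
--             if after[i] != -1:
--                 w2.append(w[i])
--             else:
--                 w2.append((w[i - 1] if i > 0 else 0) + (w[i + 1] if i + 1 < n else 0))
--         w2 += [0] * (len(rows[k - 1]) - n)
--         w = w2
--     return sum(b * x for b, x in zip(rows[0], w))
-- ===== Notes on version B (the rewrite author's own statement) =====
-- stated objective: alternative
-- what changed: B replaces A's forward count propagation (scattering each cell's count into the next row) by the adjoint computation: it walks the rows in reverse, pulling a weight vector (initialised to ones at the last row) upward through each row's transition, and returns the dot product of the first row with the resulting weights; this is correct because each row step is a linear map M and ones.(Mk...M1 r0) = ((ones^T Mk)...M1).r0.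
import Mathlib
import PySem

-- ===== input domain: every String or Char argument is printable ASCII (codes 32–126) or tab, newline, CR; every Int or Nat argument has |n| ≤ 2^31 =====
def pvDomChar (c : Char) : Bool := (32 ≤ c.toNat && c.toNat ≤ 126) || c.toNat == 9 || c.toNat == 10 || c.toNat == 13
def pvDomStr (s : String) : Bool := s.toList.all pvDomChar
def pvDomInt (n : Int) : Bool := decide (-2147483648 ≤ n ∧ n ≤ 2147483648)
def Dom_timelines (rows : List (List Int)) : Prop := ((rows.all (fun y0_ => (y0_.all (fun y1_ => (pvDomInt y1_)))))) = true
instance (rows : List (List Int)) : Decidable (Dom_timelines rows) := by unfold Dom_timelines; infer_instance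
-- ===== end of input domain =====

-- B replaces A's forward count propagation by the adjoint pass: weights pulled backward from the last row, then a dot product with the first row (alternative algorithm, same cost).


-- ===== PORT A =====
-- working[k] += v  (k is always in range when this is reached)
def addAt (w : List Int) (k : Nat) (v : Int) : List Int := w.set k (w.getD k 0 + v)

-- the body of A's inner 'for i, aval in enumerate(after)' loop
def scatF (before after : List Int) (w : List Int) (p : Int × Int) : List Int :=
  let bval := PySem.List.pyGetD before p.1 0
  if p.2 = -1 then
    let w1 := if 0 < p.1 then addAt w (p.1 - 1).toNat bval else w
    if p.1 < (after.length : Int) - 1 then addAt w1 (p.1 + 1).toNat bval else w1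
  else addAt w p.1.toNat bval

-- one row of A: working = [0]*len(after), then the scatter loop over enumerate(after)
def scatterA (before after : List Int) : List Int :=
  (PySem.List.enumerate after).foldl (scatF before after) (List.replicate after.length 0)

-- A raises IndexError at 'bval = before[i]' exactly when len(after) > len(before)
-- (the first failing read is at i = len(before)): the length guard marks exactly those rows as none.
def timelines (rows : List (List Int)) : Int :=
  match PySem.List.pyGet? rows 0 with
  | none => 0  -- rows[0] raises IndexError on []; excluded by Pre_
  | some b0 =>
    match (PySem.List.slice rows (some 1) none).foldl
        (fun ob after => ob.bind fun before =>
          if after.length ≤ before.length then some (scatterA before after) else none)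
        (some b0) with
    | none => 0  -- IndexError inside the loop; excluded by Pre_
    | some before => before.sum

-- ===== PORT B =====
-- one entry of the pulled-back weight vector: the body of Source B's inner 'for i in range(n)' loop
def pullAt (after w : List Int) (i : Nat) : Int :=
  if after.getD i 0 ≠ -1 then w.getD i 0
  else (if 0 < i then w.getD (i - 1) 0 else 0)
    + (if i + 1 < after.length then w.getD (i + 1) 0 else 0)

-- one backward step of Source B: w2 (over range n) followed by the zero padding to the previous row's length
def pullRow (prevLen : Nat) (after w : List Int) : List Int :=
  (List.range after.length).map (pullAt after w) ++ List.replicate (prevLen - after.length) 0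

-- sum(b * x for b, x in zip(rows[0], w))
def dotZip (xs ys : List Int) : Int := ((xs.zip ys).map (fun p => p.1 * p.2)).sum

-- Source B's descending loop over k = len(rows)-1 … 1 is the right fold over the pairs (rows[k-1], rows[k])
def timelines_alt (rows : List (List Int)) : Int :=
  match rows with
  | [] => 0  -- rows[-1] / rows[0] raise IndexError on []; excluded by Pre_
  | r0 :: rest =>
    let w0 : List Int := List.replicate ((r0 :: rest).getLastD []).length 1
    let w := ((r0 :: rest).zip rest).foldr (fun p w => pullRow p.1.length p.2 w) w0
    dotZip r0 w

-- ===== PRECONDITION & SPEC =====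
-- Pre_ holds exactly where the Python A returns: rows nonempty and consecutive row lengths
-- nonincreasing (otherwise 'before[i]' raises IndexError at i = len(before)).
def Pre_timelines (rows : List (List Int)) : Prop :=
  rows ≠ [] ∧ ((rows.zip rows.tail).all (fun p => decide (p.2.length ≤ p.1.length))) = true
instance (rows : List (List Int)) : Decidable (Pre_timelines rows) := by
  unfold Pre_timelines; infer_instance

def pvWitness_timelines : List (List Int) := [[1, 2, -1], [3, -1, 4], [5, 6]]

def Spec_timelines (rows : List (List Int)) (out : Int) : Prop := out = timelines_alt rows
instance (rows : List (List Int)) (out : Int) : Decidable (Spec_timelines rows out) := by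
  unfold Spec_timelines; infer_instance

-- ===== CLAIM (what is proved, stated in full; the proofs are below) =====
def Claim_equal_timelines : Prop :=
  ∀ (rows : List (List Int)), Dom_timelines rows → Pre_timelines rows →
    Spec_timelines rows (timelines rows)

-- ===== LEMMAS AND PROOFS =====

-- recursive form of B's backward weight vector, used only by the proofs
def wts (before : List Int) : List (List Int) → List Int
  | [] => List.replicate before.length 1
  | after :: rest => pullRow before.length after (wts after rest)

theorem length_addAt (w : List Int) (k : Nat) (v : Int) : (addAt w k v).length = w.length := by
  simp [addAt]

theorem getD_addAt (w : List Int) (k j : Nat) (v : Int) (hk : k < w.length) :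
    (addAt w k v).getD j 0 = if j = k then w.getD j 0 + v else w.getD j 0 := by
  unfold addAt
  by_cases h : j = k
  · subst h; simp [List.getD, hk]
  · simp [List.getD, List.getElem?_set_ne (by omega : k ≠ j), h]

-- the contribution of one enumerate pair to output index j
def deltaA (before : List Int) (n : Nat) (p : Int × Int) (j : Nat) : Int :=
  let bval := PySem.List.pyGetD before p.1 0
  if p.2 = -1 then
    (if 0 < p.1 ∧ (p.1 - 1).toNat = j then bval else 0)
    + (if p.1 < (n : Int) - 1 ∧ (p.1 + 1).toNat = j then bval else 0)
  else (if p.1.toNat = j then bval else 0)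

theorem length_scatF (before after w : List Int) (p : Int × Int) :
    (scatF before after w p).length = w.length := by
  unfold scatF
  split_ifs <;> simp [length_addAt]

theorem getD_scatF (before after w : List Int) (p : Int × Int)
    (hw : w.length = after.length) (hp : 0 ≤ p.1 ∧ p.1 < (after.length : Int)) (j : Nat) :
    (scatF before after w p).getD j 0 = w.getD j 0 + deltaA before after.length p j := by
  unfold scatF deltaA
  by_cases h2 : p.2 = -1
  · simp only [h2, if_pos]
    by_cases hl : 0 < p.1 <;> by_cases hr : p.1 < (after.length : Int) - 1
    · rw [if_pos hl, if_pos hr,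
        getD_addAt _ _ _ _ (by rw [length_addAt, hw]; omega),
        getD_addAt _ _ _ _ (by rw [hw]; omega)]
      split_ifs <;> omega
    · rw [if_pos hl, if_neg hr, getD_addAt _ _ _ _ (by rw [hw]; omega)]
      split_ifs <;> omega
    · rw [if_neg hl, if_pos hr, getD_addAt _ _ _ _ (by rw [hw]; omega)]
      split_ifs <;> omega
    · rw [if_neg hl, if_neg hr]
      split_ifs <;> omega
  · rw [if_neg h2, if_neg h2, getD_addAt _ _ _ _ (by rw [hw]; omega)]
    split_ifs <;> omega

theorem length_scatFold (before after : List Int) :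
    ∀ (ps : List (Int × Int)) (w : List Int),
      (ps.foldl (scatF before after) w).length = w.length := by
  intro ps
  induction ps with
  | nil => intro w; rfl
  | cons p ps ih => intro w; rw [List.foldl_cons, ih, length_scatF]

theorem length_scatterA (before after : List Int) :
    (scatterA before after).length = after.length := by
  unfold scatterA; rw [length_scatFold]; simp

theorem getD_scatFold (before after : List Int) :
    ∀ (ps : List (Int × Int)) (w : List Int), w.length = after.length →
      (∀ p ∈ ps, 0 ≤ p.1 ∧ p.1 < (after.length : Int)) → ∀ j,
      (ps.foldl (scatF before after) w).getD j 0
        = w.getD j 0 + (ps.map (fun p => deltaA before after.length p j)).sum := by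
  intro ps
  induction ps with
  | nil => intro w _ _ j; simp
  | cons p ps ih =>
    intro w hw hmem j
    rw [List.foldl_cons, ih _ (by rw [length_scatF]; exact hw)
      (fun q hq => hmem q (List.mem_cons_of_mem _ hq)),
      getD_scatF before after w p hw (hmem p (List.mem_cons_self ..))]
    simp [add_assoc]

theorem listsum_range (n : Nat) (f : Nat → Int) :
    ((List.range n).map f).sum = ∑ i ∈ Finset.range n, f i := by
  induction n with
  | zero => simp
  | succ m ih =>
    rw [List.range_succ, List.map_append, List.sum_append, ih, Finset.sum_range_succ]
    simp

theorem scatterA_getD (before after : List Int) (j : Nat) :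
    (scatterA before after).getD j 0
      = ∑ i ∈ Finset.range after.length,
          deltaA before after.length ((i : Int), after.getD i 0) j := by
  unfold scatterA
  rw [getD_scatFold before after _ _ (by simp)
    (by
      intro p hp
      rcases (PySem.List.mem_enumerate_iff _ _ _).mp hp with ⟨k, hk, rfl⟩
      refine ⟨by simp, by simp; omega⟩)
    j]
  rw [PySem.List.enumerate_eq_map_pyRange after 0]
  rw [show PySem.List.len after = ((after.length : Nat) : Int) from rfl,
    PySem.List.pyRange_zero_nat, List.map_map, List.map_map]
  simp only [Function.comp_def, PySem.List.pyGetD_natCast]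
  rw [listsum_range]
  have hrep : (List.replicate after.length (0 : Int)).getD j 0 = 0 := by
    simp [List.getD]
  rw [hrep, zero_add]

theorem sum_ite_eq_int (n k : Nat) (f : Nat → Int) :
    (∑ j ∈ Finset.range n, if j = k then f j else 0) = if k < n then f k else 0 := by
  rw [Finset.sum_ite_eq' (Finset.range n) k f]
  simp

theorem dotZip_eq_sum (xs : List Int) :
    ∀ ys : List Int, dotZip xs ys
      = ∑ i ∈ Finset.range (min xs.length ys.length), xs.getD i 0 * ys.getD i 0 := by
  induction xs with
  | nil => intro ys; simp [dotZip]
  | cons x xs ih =>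
    intro ys
    cases ys with
    | nil => simp [dotZip]
    | cons y ys =>
      have : min (x :: xs).length (y :: ys).length = min xs.length ys.length + 1 := by
        simp [Nat.succ_min_succ]
      rw [this, Finset.sum_range_succ']
      have hz : dotZip (x :: xs) (y :: ys) = x * y + dotZip xs ys := by
        simp [dotZip]
      rw [hz, ih ys]
      simp [add_comm]

theorem getD_pullRow_lt (prevLen : Nat) (after w : List Int) (i : Nat)
    (hi : i < after.length) :
    (pullRow prevLen after w).getD i 0 = pullAt after w i := by
  unfold pullRow
  rw [List.getD, List.getElem?_append_left (by simp [hi]), ← List.getD]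
  simp [hi]

theorem getD_pullRow_ge (prevLen : Nat) (after w : List Int) (i : Nat)
    (hi : after.length ≤ i) :
    (pullRow prevLen after w).getD i 0 = 0 := by
  unfold pullRow
  rw [List.getD, List.getElem?_append_right (by simp [hi]), List.getElem?_replicate]
  split_ifs <;> simp

theorem length_pullRow (prevLen : Nat) (after w : List Int) (h : after.length ≤ prevLen) :
    (pullRow prevLen after w).length = prevLen := by
  unfold pullRow; simp; omega

-- the transpose identity for one row step: scatter forward then dot = dot after pulling weights back
theorem transpose_step (before after w : List Int)
    (hle : after.length ≤ before.length) (hw : w.length = after.length) :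
    dotZip (scatterA before after) w = dotZip before (pullRow before.length after w) := by
  have hn : (scatterA before after).length = after.length := length_scatterA before after
  rw [dotZip_eq_sum, dotZip_eq_sum, hn, hw, Nat.min_self,
    length_pullRow _ _ _ hle, Nat.min_self]
  have hL : ∀ j ∈ Finset.range after.length,
      (scatterA before after).getD j 0 * w.getD j 0
        = ∑ i ∈ Finset.range after.length,
            deltaA before after.length ((i : Int), after.getD i 0) j * w.getD j 0 := by
    intro j _
    rw [scatterA_getD, Finset.sum_mul]
  rw [Finset.sum_congr rfl hL, Finset.sum_comm]
  have hR : ∀ i ∈ Finset.range after.length,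
      (∑ j ∈ Finset.range after.length,
          deltaA before after.length ((i : Int), after.getD i 0) j * w.getD j 0)
        = before.getD i 0 * pullAt after w i := by
    intro i hi
    have hi' : i < after.length := Finset.mem_range.mp hi
    unfold deltaA pullAt
    simp only [PySem.List.pyGetD_natCast]
    by_cases hm : after.getD i 0 = -1
    · rw [if_neg (not_not_intro hm)]
      have hsplit : ∀ j,
          (if after.getD i 0 = -1 then
              (if 0 < (i : Int) ∧ ((i : Int) - 1).toNat = j then before.getD i 0 else 0)
              + (if (i : Int) < (after.length : Int) - 1 ∧ ((i : Int) + 1).toNat = j then before.getD i 0 else 0)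
            else if ((i : Int)).toNat = j then before.getD i 0 else 0) * w.getD j 0
          = (if j = i - 1 then (if 0 < i then before.getD i 0 * w.getD j 0 else 0) else 0)
            + (if j = i + 1 then (if i + 1 < after.length then before.getD i 0 * w.getD j 0 else 0) else 0) := by
        intro j
        rw [if_pos hm]
        split_ifs <;> first | ring1 | (exfalso; omega)
      rw [Finset.sum_congr rfl (fun j _ => hsplit j), Finset.sum_add_distrib,
        sum_ite_eq_int, sum_ite_eq_int, if_pos (by omega : i - 1 < after.length)]
      split_ifs <;> ring
    · rw [if_pos (show after.getD i 0 ≠ -1 from hm)]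
      have hsplit : ∀ j,
          (if after.getD i 0 = -1 then
              (if 0 < (i : Int) ∧ ((i : Int) - 1).toNat = j then before.getD i 0 else 0)
              + (if (i : Int) < (after.length : Int) - 1 ∧ ((i : Int) + 1).toNat = j then before.getD i 0 else 0)
            else if ((i : Int)).toNat = j then before.getD i 0 else 0) * w.getD j 0
          = (if j = i then before.getD i 0 * w.getD j 0 else 0) := by
        intro j
        rw [if_neg hm]
        split_ifs <;> first | ring1 | (exfalso; omega)
      rw [Finset.sum_congr rfl (fun j _ => hsplit j), sum_ite_eq_int, if_pos hi']
  rw [Finset.sum_congr rfl hR]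
  have hLR : ∀ i ∈ Finset.range after.length,
      before.getD i 0 * pullAt after w i
        = before.getD i 0 * (pullRow before.length after w).getD i 0 := by
    intro i hi
    rw [getD_pullRow_lt _ _ _ _ (Finset.mem_range.mp hi)]
  rw [Finset.sum_congr rfl hLR]
  exact Finset.sum_subset (fun x hx => Finset.mem_range.mpr (lt_of_lt_of_le (Finset.mem_range.mp hx) hle)) (fun i _ hnot => by
    rw [getD_pullRow_ge _ _ _ _ (Nat.le_of_not_lt (fun h => hnot (Finset.mem_range.mpr h))),
      mul_zero])

theorem wts_congr_length (b1 b2 : List Int) (h : b1.length = b2.length) :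
    ∀ rest, wts b1 rest = wts b2 rest := by
  intro rest
  cases rest with
  | nil => simp [wts, h]
  | cons a r => simp [wts, h]

theorem wts_length : ∀ (rest : List (List Int)) (before : List Int),
    ((before :: rest).zip rest).all (fun p => decide (p.2.length ≤ p.1.length)) = true →
    (wts before rest).length = before.length := by
  intro rest
  induction rest with
  | nil => intro before _; simp [wts]
  | cons a r ih =>
    intro before h
    rw [show (before :: a :: r).zip (a :: r) = (before, a) :: ((a :: r).zip r) from rfl,
      List.all_cons, Bool.and_eq_true] at h
    exact (length_pullRow _ _ _ (by simpa using h.1))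

-- the forward fold (with IndexError guards) succeeds under the chain condition
theorem fold_eq (rest : List (List Int)) :
    ∀ (before : List Int),
      (((before :: rest).zip rest).all (fun p => decide (p.2.length ≤ p.1.length))) = true →
      rest.foldl
        (fun ob after => ob.bind fun b =>
          if after.length ≤ b.length then some (scatterA b after) else none)
        (some before)
      = some (rest.foldl (fun b a => scatterA b a) before) := by
  induction rest with
  | nil => intro before _; rfl
  | cons after rest' ih =>
    intro before h
    rw [show (before :: after :: rest').zip (after :: rest')
          = (before, after) :: ((after :: rest').zip rest') from rfl,
      List.all_cons, Bool.and_eq_true] at h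
    obtain ⟨h1, h2⟩ := h
    have h1' : after.length ≤ before.length := by simpa using h1
    rw [List.foldl_cons, List.foldl_cons]
    simp only [Option.bind_some]
    rw [if_pos h1']
    apply ih
    cases rest' with
    | nil => rfl
    | cons r rs =>
      rw [show (after :: r :: rs).zip (r :: rs) = (after, r) :: ((r :: rs).zip rs) from rfl,
        List.all_cons, Bool.and_eq_true] at h2
      rw [show (scatterA before after :: r :: rs).zip (r :: rs)
            = (scatterA before after, r) :: ((r :: rs).zip rs) from rfl,
        List.all_cons, Bool.and_eq_true]
      exact ⟨by simpa [length_scatterA] using h2.1, h2.2⟩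

theorem dotZip_ones (xs : List Int) :
    dotZip xs (List.replicate xs.length 1) = xs.sum := by
  induction xs with
  | nil => rfl
  | cons x xs ih =>
    unfold dotZip at ih ⊢
    rw [List.length_cons, List.replicate_succ]
    simp only [List.zip_cons_cons, List.map_cons, List.sum_cons, ih]
    ring

-- the heart: forward propagation summed = first row dotted with the backward weights
theorem forward_eq_backward (rest : List (List Int)) :
    ∀ (before : List Int),
      (((before :: rest).zip rest).all (fun p => decide (p.2.length ≤ p.1.length))) = true →
      (rest.foldl (fun b a => scatterA b a) before).sum = dotZip before (wts before rest) := by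
  induction rest with
  | nil => intro before _; simp [wts, dotZip_ones]
  | cons after rest' ih =>
    intro before h
    rw [show (before :: after :: rest').zip (after :: rest')
          = (before, after) :: ((after :: rest').zip rest') from rfl,
      List.all_cons, Bool.and_eq_true] at h
    obtain ⟨h1, h2⟩ := h
    have h1' : after.length ≤ before.length := by simpa using h1
    have hchain' :
        (((scatterA before after :: rest').zip rest').all
          (fun p => decide (p.2.length ≤ p.1.length))) = true := by
      cases rest' with
      | nil => rfl
      | cons r rs =>
        rw [show (after :: r :: rs).zip (r :: rs) = (after, r) :: ((r :: rs).zip rs) from rfl,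
          List.all_cons, Bool.and_eq_true] at h2
        rw [show (scatterA before after :: r :: rs).zip (r :: rs)
              = (scatterA before after, r) :: ((r :: rs).zip rs) from rfl,
          List.all_cons, Bool.and_eq_true]
        exact ⟨by simpa [length_scatterA] using h2.1, h2.2⟩
    rw [List.foldl_cons, ih (scatterA before after) hchain']
    rw [wts_congr_length (scatterA before after) after (length_scatterA before after) rest']
    show dotZip (scatterA before after) (wts after rest') = dotZip before (wts before (after :: rest'))
    rw [show wts before (after :: rest') = pullRow before.length after (wts after rest') from rfl]
    exact transpose_step before after (wts after rest') h1' (wts_length rest' after h2)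

-- B's foldr over the zipped pairs computes the recursive weights
theorem backw_eq (rest : List (List Int)) :
    ∀ (before : List Int),
      ((before :: rest).zip rest).foldr (fun p w => pullRow p.1.length p.2 w)
          (List.replicate ((before :: rest).getLastD []).length 1)
        = wts before rest := by
  induction rest with
  | nil => intro before; simp [wts]
  | cons a r ih =>
    intro before
    have hlast : (before :: a :: r).getLastD [] = (a :: r).getLastD [] := by
      rw [List.getLastD_eq_getLast?, List.getLastD_eq_getLast?]
      simp [List.getLast?]
    rw [show (before :: a :: r).zip (a :: r) = (before, a) :: ((a :: r).zip r) from rfl,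
      List.foldr_cons, hlast, ih a]
    rfl

-- ===== VERDICT (by name: the statement is the Claim_ definition above) =====
theorem timelines_spec : Claim_equal_timelines := by
  intro rows _ hpre
  rcases hpre with ⟨hne, hch⟩
  rcases rows with _ | ⟨r0, rest⟩
  · exact absurd rfl hne
  unfold Spec_timelines timelines timelines_alt
  have hget : PySem.List.pyGet? (r0 :: rest) 0 = some r0 := by
    simp [PySem.List.pyGet?, PySem.List.pyIdx?]
  simp only [PySem.List.slice_from_one, List.tail_cons, hget]
  rw [fold_eq rest r0 hch]
  simp only [backw_eq rest r0]
  exact forward_eq_backward rest r0 hch
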